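-- pv_equiv track=rewrite | github.com/bittr-ai/tess-vetter | src/tess_vetter/code_mode/migration/ops_library_migration.py | _group_ids_by_tier_prefix
-- ===== SOURCE A (Python) =====
-- from collections import defaultdict
-- from collections.abc import Iterable, Mapping, Sequence
--
-- def _normalize_ids(ids: Iterable[str]) -> tuple[str, ...]:
--     """Normalize ids into sorted unique tuples for deterministic processing."""
--     return tuple(sorted({str(value) for value in ids}))
--
-- def _tier_prefix(operation_id: str) -> str:
--     """Return the first two path segments used as a tier prefix."""
--     segments = operation_id.split(".")
--     if len(segments) >= 2:
--         return ".".join(segments[:2])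
--     return segments[0]
--
-- def _group_ids_by_tier_prefix(ids: Iterable[str]) -> tuple[tuple[str, tuple[str, ...]], ...]:
--     """Group ids by tier prefix with deterministic ordering."""
--     grouped: dict[str, list[str]] = defaultdict(list)
--     for operation_id in _normalize_ids(ids):
--         grouped[_tier_prefix(operation_id)].append(operation_id)
--     return tuple(
--         (tier_prefix, tuple(sorted(values)))
--         for tier_prefix, values in sorted(grouped.items())
--     )
-- ===== SOURCE B (Python) =====
-- def _tier_prefix(operation_id: str) -> str:
--     segments = operation_id.split(".")
--     if len(segments) >= 2:
--         return ".".join(segments[:2])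
--     return segments[0]
--
-- def _group_ids_by_tier_prefix(ids):
--     """Sort the unique ids by (tier prefix, id) so equal-prefix ids are contiguous,
--     then collect the contiguous runs in one pass."""
--     unique = sorted({str(value) for value in ids}, key=lambda x: (_tier_prefix(x), x))
--     out = []
--     for x in unique:
--         p = _tier_prefix(x)
--         if out and out[-1][0] == p:
--             out[-1] = (p, out[-1][1] + (x,))
--         else:
--             out.append((p, (x,)))
--     return tuple(out)
-- ===== Notes on version B (the rewrite author's own statement) =====
-- stated objective: alternative
-- what changed: Replaces the defaultdict accumulator plus a sort of the dict items and a per-group re-sort by one sort of the unique ids under the composite key (tier prefix, id) followed by a single pass that collects the contiguous equal-prefix runs.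
import Mathlib
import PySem

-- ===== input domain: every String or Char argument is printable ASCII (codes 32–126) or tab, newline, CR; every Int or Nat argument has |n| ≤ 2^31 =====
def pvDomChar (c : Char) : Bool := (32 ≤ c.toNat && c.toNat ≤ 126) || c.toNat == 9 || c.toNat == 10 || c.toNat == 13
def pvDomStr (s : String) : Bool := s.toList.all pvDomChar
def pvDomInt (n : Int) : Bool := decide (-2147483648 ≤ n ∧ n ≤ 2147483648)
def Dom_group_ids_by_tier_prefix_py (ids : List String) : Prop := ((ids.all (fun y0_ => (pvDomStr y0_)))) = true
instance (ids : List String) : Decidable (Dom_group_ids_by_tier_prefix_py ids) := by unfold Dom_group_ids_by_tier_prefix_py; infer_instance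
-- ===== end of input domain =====

-- B replaces the defaultdict accumulator + sort of items + per-group re-sort by one sort of
-- the unique ids by the composite key (tier prefix, id) followed by a single pass collecting
-- the contiguous equal-prefix runs (objective: alternative).

-- ===== PORT A =====
-- _tier_prefix: '.'-split, join of the first two segments (or the single segment).
-- s.split(".") never returns an empty list, so segments[0] is its head ('none'/headD branches unreachable).
def tierPrefix (s : String) : String :=
  match PySem.Str.split? s "." with
  | some segments =>
      if 2 ≤ segments.length then PySem.Str.join "." (PySem.List.slice segments none (some 2))
      else segments.headD ""
  | none => ""

def group_ids_by_tier_prefix_py (ids : List String) : List (String × List String) :=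
  -- _normalize_ids: tuple(sorted({str(v) for v in ids})) (str(v) is the identity on str input)
  let normalized := PySem.List.sorted (PySem.Set.ofList ids) (fun x => x) false
  -- grouped: defaultdict(list); grouped[_tier_prefix(x)].append(x)
  let grouped := normalized.foldl
    (fun d x => d.modify (tierPrefix x) [] (fun v => v ++ [x])) PySem.Dict.empty
  -- sorted(grouped.items()): dict keys are distinct, so Python's tuple comparison is
  -- decided by the key alone — ported as the (stable) sort by the first component.
  (PySem.List.sorted grouped.items (fun p => p.1) false).map
    (fun p => (p.1, PySem.List.sorted p.2 (fun x => x) false))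

-- ===== PORT B =====
def group_ids_by_tier_prefix_py_alt (ids : List String) : List (String × List String) :=
  -- Python's key (lambda x: (_tier_prefix(x), x)) compares tuples lexicographically:
  -- ported exactly with Mathlib's lexicographic product String ×ₗ String.
  let unique := PySem.List.sorted (PySem.Set.ofList ids)
    (fun x => (toLex (tierPrefix x, x) : Lex (String × String))) false
  -- single pass: extend the last run while the prefix repeats, else open a new run
  let out := unique.foldl
    (fun out x =>
      let p := tierPrefix x
      match out.getLast? with
      | some (q, g) => if q == p then out.dropLast ++ [(p, g ++ [x])] else out ++ [(p, [x])]
      | none => out ++ [(p, [x])])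
    []
  out

-- ===== PRECONDITION & SPEC =====
def Spec_group_ids_by_tier_prefix_py (ids : List String) (out : List (String × List String)) : Prop := out = group_ids_by_tier_prefix_py_alt ids
instance (ids : List String) (out : List (String × List String)) : Decidable (Spec_group_ids_by_tier_prefix_py ids out) := by unfold Spec_group_ids_by_tier_prefix_py; infer_instance

-- ===== CLAIM (what is proved, stated in full; the proofs are below) =====
def Claim_equal_group_ids_by_tier_prefix_py : Prop := ∀ (ids : List String), Dom_group_ids_by_tier_prefix_py ids → Spec_group_ids_by_tier_prefix_py ids (group_ids_by_tier_prefix_py ids)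

-- ===== LEMMAS AND PROOFS =====

-- a nodup list of keys sums a one-hot map to the hit (or 0)
theorem sum_map_onehot (P : List String) (c : String) (n : Nat) (hN : P.Nodup) :
    (P.map (fun k => if c = k then n else 0)).sum = if c ∈ P then n else 0 := by
  induction P with
  | nil => simp
  | cons k P' ih =>
      rw [List.nodup_cons] at hN
      obtain ⟨hk, hN'⟩ := hN
      by_cases h : c = k
      · subst h
        simp [hk, ih hN']
      · simp [h, ih hN']

-- the concatenation of the filter-groups over a nodup, covering key list is a permutation
theorem perm_flatMap_filter (key : String → String) (S P : List String)
    (hN : P.Nodup) (hcov : ∀ x ∈ S, key x ∈ P) :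
    (P.flatMap (fun k => S.filter (fun x => key x == k))).Perm S := by
  rw [List.perm_iff_count]
  intro a
  rw [List.count_flatMap]
  have h1 : (List.map (List.count a ∘ fun k => S.filter (fun x => key x == k)) P)
      = P.map (fun k => if key a = k then S.count a else 0) := by
    refine List.map_congr_left (fun k _ => ?_)
    by_cases h : key a = k
    · rw [show ((List.count a ∘ fun k => S.filter (fun x => key x == k)) k)
            = List.count a (S.filter (fun x => key x == k)) from rfl,
        List.count_filter (by simp [h])]
      simp [h]
    · have hnm : a ∉ S.filter (fun x => key x == k) := by
        intro hmem
        exact h (by simpa using List.of_mem_filter hmem)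
      simp [Function.comp, List.count_eq_zero.mpr hnm, h]
  rw [h1, sum_map_onehot _ _ _ hN]
  by_cases ha : a ∈ S
  · simp [hcov a ha]
  · simp [List.count_eq_zero.mpr ha]

-- one step of B's run-collecting fold
def runStep (out : List (String × List String)) (x : String) : List (String × List String) :=
  match out.getLast? with
  | some (q, g) => if q == tierPrefix x then out.dropLast ++ [(tierPrefix x, g ++ [x])]
                   else out ++ [(tierPrefix x, [x])]
  | none => out ++ [(tierPrefix x, [x])]

-- one run of the fold: a block of equal-prefix elements merges into the open last run
theorem fold_run (k : String) (g : List String) (hg : ∀ x ∈ g, tierPrefix x = k) :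
    ∀ (acc : List (String × List String)) (v : List String),
      g.foldl runStep (acc ++ [(k, v)]) = acc ++ [(k, v ++ g)] := by
  induction g with
  | nil => intro acc v; simp
  | cons x g' ih =>
      intro acc v
      have hx : tierPrefix x = k := hg x (by simp)
      have hstep1 : runStep (acc ++ [(k, v)]) x = acc ++ [(k, v ++ [x])] := by
        simp [runStep, hx]
      rw [List.foldl_cons, hstep1, ih (fun y hy => hg y (by simp [hy])) acc (v ++ [x])]
      simp

-- the full fold over the concatenated groups appends one closed run per key
theorem fold_groups (G : String → List String) :
    ∀ (P : List String), P.Nodup →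
      (∀ k ∈ P, G k ≠ [] ∧ ∀ x ∈ G k, tierPrefix x = k) →
      ∀ (acc : List (String × List String)),
        (∀ q v, acc.getLast? = some (q, v) → q ∉ P) →
        (P.flatMap G).foldl runStep acc = acc ++ P.map (fun k => (k, G k)) := by
  intro P
  induction P with
  | nil => intro _ _ acc _; simp
  | cons k P' ih =>
      intro hN hG acc hacc
      rw [List.nodup_cons] at hN
      obtain ⟨hne, hpref⟩ := hG k (by simp)
      obtain ⟨x, g', hxg⟩ := List.exists_cons_of_ne_nil hne
      have hx : tierPrefix x = k := hpref x (by simp [hxg])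
      have hstep1 : runStep acc x = acc ++ [(k, [x])] := by
        cases hlast : acc.getLast? with
        | none => simp [runStep, hlast, hx]
        | some p =>
            obtain ⟨q, v⟩ := p
            have hq : q ≠ k := fun h => (hacc q v hlast) (by simp [h])
            simp [runStep, hlast, hx, hq]
      have hrun : g'.foldl runStep (acc ++ [(k, [x])]) = acc ++ [(k, [x] ++ g')] :=
        fold_run k g' (fun y hy => hpref y (by simp [hxg, hy])) acc [x]
      rw [List.flatMap_cons, List.foldl_append, hxg, List.foldl_cons, hstep1, hrun]
      have hacc' : ∀ q v, (acc ++ [(k, [x] ++ g')]).getLast? = some (q, v) → q ∉ P' := by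
        intro q v h
        rw [List.getLast?_concat] at h
        cases h
        exact hN.1
      rw [ih hN.2 (fun k' hk' => hG k' (by simp [hk'])) (acc ++ [(k, [x] ++ g')]) hacc']
      simp [hxg]

theorem group_eq (ids : List String) :
    group_ids_by_tier_prefix_py ids = group_ids_by_tier_prefix_py_alt ids := by
  set S := PySem.List.sorted (PySem.Set.ofList ids) (fun x => x) false with hSdef
  set d := S.foldl (fun d x => d.modify (tierPrefix x) [] (fun v => v ++ [x])) PySem.Dict.empty with hddef
  set G : String → List String := fun k => S.filter (fun x => tierPrefix x == k) with hGdef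
  set P := PySem.List.sorted (PySem.Set.ofList (S.map tierPrefix)) (fun x => x) false with hPdef
  show List.map (fun p => (p.1, PySem.List.sorted p.2 (fun x => x) false))
        (PySem.List.sorted d.items (fun p => p.1) false)
      = (PySem.List.sorted (PySem.Set.ofList ids)
          (fun x => (toLex (tierPrefix x, x) : Lex (String × String))) false).foldl runStep []
  have hS : S.Pairwise (· < ·) := PySem.List.sorted_ofList_pairwise_lt ids
  have hP : P.Pairwise (· < ·) := PySem.List.sorted_ofList_pairwise_lt (S.map tierPrefix)
  have hPnodup : P.Nodup :=
    (List.Perm.nodup_iff (PySem.List.sorted_perm _ _ false)).mpr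
      (PySem.Set.nodup_ofList (S.map tierPrefix))
  have hmemP : ∀ x ∈ S, tierPrefix x ∈ P := by
    intro x hx
    rw [hPdef, PySem.List.mem_sorted, PySem.Set.mem_ofList]
    exact List.mem_map_of_mem hx
  have hprefG : ∀ k, ∀ x ∈ G k, tierPrefix x = k := by
    intro k x hx
    simpa using List.of_mem_filter hx
  -- ===== A's side: sorted items of the grouping dict = prefix-keyed groups =====
  have hfoldeq : d = List.foldl (fun d p => d.modify p.1 [] (fun v => v ++ [p.2]))
      PySem.Dict.empty (S.map (fun x => (tierPrefix x, x))) := by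
    rw [List.foldl_map]
  have hnodup : d.keys.Nodup := by
    have h := PySem.Dict.nodup_keys_foldl_modify_key S tierPrefix []
      (fun _ x v => v ++ [x]) PySem.Dict.empty (by simp)
    simpa using h
  have hkeys : d.keys = PySem.Set.ofList (S.map tierPrefix) := by
    have h := PySem.Dict.keys_foldl_modify_key S tierPrefix [] (fun _ x v => v ++ [x]) PySem.Dict.empty
    simpa [PySem.Set.update_nil_left] using h
  have hget : ∀ c, d.getD c [] = G c := by
    intro c
    rw [hfoldeq, PySem.Dict.getD_foldl_modify_append]
    simp [hGdef, List.filter_map, List.map_map, Function.comp_def]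
  have hitems : d.items = (PySem.Set.ofList (S.map tierPrefix)).map (fun k => (k, G k)) := by
    rw [PySem.Dict.items_eq_map_keys d hnodup [], hkeys]
    exact List.map_congr_left (fun k _ => by rw [hget])
  have hsorted_items : PySem.List.sorted d.items (fun p => p.1) false
      = P.map (fun k => (k, G k)) := by
    apply PySem.List.sorted_eq_of_perm_of_pairwise_lt
    · rw [hitems]
      exact List.Perm.map _ (PySem.List.sorted_perm _ _ false)
    · exact hP.map _ (fun a b h => h)
  have hA : List.map (fun p => (p.1, PySem.List.sorted p.2 (fun x => x) false))
        (PySem.List.sorted d.items (fun p => p.1) false)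
      = P.map (fun k => (k, G k)) := by
    rw [hsorted_items, List.map_map]
    refine List.map_congr_left (fun k _ => ?_)
    simp only [Function.comp_apply]
    exact congrArg (Prod.mk k)
      (PySem.List.sorted_eq_self_of_pairwise _ _ ((hS.filter _).imp (fun h => le_of_lt h)))
  -- ===== B's side: the (prefix, id)-sorted uniques are the concatenated groups =====
  have hT : PySem.List.sorted (PySem.Set.ofList ids)
      (fun x => (toLex (tierPrefix x, x) : Lex (String × String))) false = P.flatMap G := by
    apply PySem.List.sorted_eq_of_perm_of_pairwise_lt
    · exact (perm_flatMap_filter tierPrefix S P hPnodup hmemP).trans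
        (PySem.List.sorted_perm _ _ false)
    · rw [List.flatMap_def, List.pairwise_flatten]
      constructor
      · intro l hl
        obtain ⟨k, _, rfl⟩ := List.mem_map.mp hl
        refine (List.Pairwise.and_mem.mp (hS.filter _)).imp ?_
        rintro a b ⟨ha, hb, hlt⟩
        refine Prod.Lex.toLex_lt_toLex.mpr (Or.inr ⟨?_, hlt⟩)
        rw [hprefG k a ha, hprefG k b hb]
      · rw [List.pairwise_map]
        refine hP.imp ?_
        intro k1 k2 hlt x hx y hy
        refine Prod.Lex.toLex_lt_toLex.mpr (Or.inl ?_)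
        rw [hprefG k1 x hx, hprefG k2 y hy]
        exact hlt
  have hGne : ∀ k ∈ P, G k ≠ [] ∧ ∀ x ∈ G k, tierPrefix x = k := by
    intro k hk
    refine ⟨?_, hprefG k⟩
    rw [hPdef, PySem.List.mem_sorted, PySem.Set.mem_ofList] at hk
    obtain ⟨x, hxS, rfl⟩ := List.mem_map.mp hk
    exact List.ne_nil_of_mem (List.mem_filter.mpr ⟨hxS, by simp⟩)
  have hB : (PySem.List.sorted (PySem.Set.ofList ids)
      (fun x => (toLex (tierPrefix x, x) : Lex (String × String))) false).foldl runStep []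
      = P.map (fun k => (k, G k)) := by
    rw [hT]
    have h := fold_groups G P hPnodup hGne [] (by simp)
    simpa using h
  rw [hA, hB]

-- ===== VERDICT (by name: the statement is the Claim_ definition above) =====
theorem group_ids_by_tier_prefix_py_spec : Claim_equal_group_ids_by_tier_prefix_py := by
  intro ids _
  unfold Spec_group_ids_by_tier_prefix_py
  exact group_eq ids
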